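-- pv_equiv track=rewrite | github.com/Jonasi-Deetens/MTG-Engine | deprecated/axis2/parsing/casting_costs.py | _extract_mana_symbols
-- ===== SOURCE A (Python) =====
-- from typing import List, Optional
--
-- def _extract_mana_symbols(cost_text: str) -> List[str]:
--     """Extract mana symbols from cost text like '{1}{R}{G}'."""
--     symbols = []
--     buf = ""
--     inside = False
--     for ch in cost_text:
--         if ch == "{":
--             inside = True
--             buf = "{"
--         elif ch == "}":
--             inside = False
--             buf += "}"
--             symbols.append(buf)
--             buf = ""
--         elif inside:
--             buf += ch
--     return symbols
-- ===== SOURCE B (Python) =====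
-- def _extract_mana_symbols(cost_text: str):
--     """Split on '}' and take each closed part's tail from its last '{'."""
--     parts = cost_text.split("}")
--     return [
--         part[part.rfind("{"):] + "}" if "{" in part else "}"
--         for part in parts[:-1]
--     ]
-- ===== Notes on version B (the rewrite author's own statement) =====
-- stated objective: simpler
-- what changed: Replaces the stateful char-by-char buffer/inside machine with a split on the closing brace plus, per closed part, taking the suffix from that part's last opening brace (rfind), emitting a bare closing brace when the part has no opening brace.
import Mathlib
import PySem

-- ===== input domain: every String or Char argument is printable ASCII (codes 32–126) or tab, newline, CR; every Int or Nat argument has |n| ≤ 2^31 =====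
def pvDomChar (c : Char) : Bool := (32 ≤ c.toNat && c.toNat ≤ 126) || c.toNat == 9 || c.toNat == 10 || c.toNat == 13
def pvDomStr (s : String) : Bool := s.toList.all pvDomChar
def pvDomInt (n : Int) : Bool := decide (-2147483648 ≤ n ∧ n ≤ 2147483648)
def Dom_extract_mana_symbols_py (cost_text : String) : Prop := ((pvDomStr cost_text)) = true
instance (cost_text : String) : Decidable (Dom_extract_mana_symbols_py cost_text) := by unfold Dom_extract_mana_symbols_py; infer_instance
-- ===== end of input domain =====

-- B replaces A's char-by-char buffer/inside state machine by split-on-'}' plus a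
-- per-part suffix-from-last-'{' rule (simpler decomposition; a timing run measured B faster by a constant factor: bulk split/rfind instead of per-char state updates).

-- ===== PORT A =====
-- Python strings are carried as List Char (buf); symbols are materialised with
-- String.mk exactly where Python appends buf + "}" to the result list.
def extract_mana_symbols_py (cost_text : String) : List String :=
  (cost_text.toList.foldl
    (fun (st : List String × List Char × Bool) ch =>
      let symbols := st.1; let buf := st.2.1; let inside := st.2.2
      if ch = '{' then (symbols, ['{'], true)
      else if ch = '}' then (symbols ++ [String.mk (buf ++ ['}'])], [], false)
      else if inside then (symbols, buf ++ [ch], true)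
      else (symbols, buf, inside))
    ([], [], false)).1

-- ===== PORT B =====
-- hand port of cost_text.split("}") for the one-char separator '}': exact
def pySplitBrace : List Char → List (List Char)
  | [] => [[]]
  | c :: cs =>
    if c = '}' then [] :: pySplitBrace cs
    else
      match pySplitBrace cs with
      | [] => [[c]]          -- unreachable: pySplitBrace is never []
      | p :: ps => (c :: p) :: ps

-- hand port of part[part.rfind("{"):] for a part known to contain '{':
-- the suffix of the part starting at its LAST '{' (exact on that domain)
def suffixFromLastOpen : List Char → Option (List Char)
  | [] => none
  | c :: cs =>
    match suffixFromLastOpen cs with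
    | some t => some t
    | none => if c = '{' then some (c :: cs) else none

def extract_mana_symbols_py_alt (cost_text : String) : List String :=
  ((pySplitBrace cost_text.toList).dropLast).map (fun part =>
    match suffixFromLastOpen part with
    | some t => String.mk (t ++ ['}'])   -- "{" in part: part[part.rfind("{"):] + "}"
    | none => "}")

-- ===== PRECONDITION & SPEC =====
def Spec_extract_mana_symbols_py (cost_text : String) (out : List String) : Prop := out = extract_mana_symbols_py_alt cost_text
instance (cost_text : String) (out : List String) : Decidable (Spec_extract_mana_symbols_py cost_text out) := by unfold Spec_extract_mana_symbols_py; infer_instance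

-- ===== CLAIM (what is proved, stated in full; the proofs are below) =====
def Claim_equal_extract_mana_symbols_py : Prop := ∀ (cost_text : String), Dom_extract_mana_symbols_py cost_text → Spec_extract_mana_symbols_py cost_text (extract_mana_symbols_py cost_text)

-- ===== LEMMAS AND PROOFS =====

-- A's loop, written as a structural recursion emitting symbols in order
def emitted (buf : List Char) (inside : Bool) : List Char → List String
  | [] => []
  | c :: cs =>
    if c = '{' then emitted ['{'] true cs
    else if c = '}' then String.mk (buf ++ ['}']) :: emitted [] false cs
    else if inside then emitted (buf ++ [c]) true cs
    else emitted buf inside cs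

-- A's buffer content at the closing '}' of a part, entered with state (buf, inside)
def segVal (buf : List Char) (inside : Bool) (p : List Char) : List Char :=
  match suffixFromLastOpen p with
  | some t => t
  | none => if inside then buf ++ p else buf

def emitSeg' (p : List Char) : String := String.mk (segVal [] false p ++ ['}'])

def emittedSpec (buf : List Char) (inside : Bool) (cs : List Char) : List String :=
  match (pySplitBrace cs).dropLast with
  | [] => []
  | p :: ps => String.mk (segVal buf inside p ++ ['}']) :: ps.map emitSeg'

theorem pySplitBrace_ne_nil (cs : List Char) : pySplitBrace cs ≠ [] := by
  cases cs with
  | nil => simp [pySplitBrace]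
  | cons c cs =>
    simp only [pySplitBrace]
    split
    · simp
    · split <;> simp

theorem foldl_eq_emitted (cs : List Char) : ∀ (sym : List String) (buf : List Char) (inside : Bool),
    (cs.foldl
      (fun (st : List String × List Char × Bool) ch =>
        let symbols := st.1; let buf := st.2.1; let inside := st.2.2
        if ch = '{' then (symbols, ['{'], true)
        else if ch = '}' then (symbols ++ [String.mk (buf ++ ['}'])], [], false)
        else if inside then (symbols, buf ++ [ch], true)
        else (symbols, buf, inside))
      (sym, buf, inside)).1 = sym ++ emitted buf inside cs := by
  induction cs with
  | nil => intro sym buf inside; simp [emitted]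
  | cons c cs ih =>
    intro sym buf inside
    by_cases h1 : c = '{'
    · simp [List.foldl_cons, h1, emitted, ih]
    · by_cases h2 : c = '}'
      · simp [List.foldl_cons, h1, h2, emitted, ih]
      · by_cases h3 : inside
        · simp [List.foldl_cons, h1, h2, h3, emitted, ih]
        · simp [List.foldl_cons, h1, h2, h3, emitted, ih]

theorem emittedSpec_base (cs : List Char) :
    emittedSpec [] false cs = ((pySplitBrace cs).dropLast).map emitSeg' := by
  unfold emittedSpec
  cases h : (pySplitBrace cs).dropLast with
  | nil => simp
  | cons p ps => simp [emitSeg']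

theorem emitted_eq_spec (cs : List Char) : ∀ (buf : List Char) (inside : Bool),
    emitted buf inside cs = emittedSpec buf inside cs := by
  induction cs with
  | nil => intro buf inside; simp [emitted, emittedSpec, pySplitBrace]
  | cons c cs ih =>
    intro buf inside
    by_cases h2 : c = '}'
    · subst h2
      have hne := pySplitBrace_ne_nil cs
      have hstep : emitted buf inside ('}' :: cs) =
          String.mk (buf ++ ['}']) :: emitted [] false cs := by
        simp [emitted]
      have hsplit : pySplitBrace ('}' :: cs) = [] :: pySplitBrace cs := by
        simp [pySplitBrace]
      have hseg : segVal buf inside [] = buf := by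
        unfold segVal suffixFromLastOpen
        cases inside <;> simp
      rw [hstep, ih, emittedSpec_base]
      unfold emittedSpec
      rw [hsplit, List.dropLast_cons_of_ne_nil hne]
      simp [hseg]
    · -- c ≠ '}' : pySplitBrace (c::cs) prepends c to the first part
      obtain ⟨p, ps, hsp⟩ : ∃ p ps, pySplitBrace cs = p :: ps := by
        cases h : pySplitBrace cs with
        | nil => exact absurd h (pySplitBrace_ne_nil cs)
        | cons p ps => exact ⟨p, ps, rfl⟩
      have hsplit : pySplitBrace (c :: cs) = (c :: p) :: ps := by
        simp [pySplitBrace, h2, hsp]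
      by_cases h1 : c = '{'
      · subst h1
        simp only [emitted, reduceIte, ih]
        unfold emittedSpec
        rw [hsp, hsplit]
        cases ps with
        | nil => simp
        | cons q qs =>
          have hd : (q :: qs) ≠ [] := by simp
          have hseg : segVal ['{'] true p = segVal buf inside ('{' :: p) := by
            unfold segVal
            simp only [suffixFromLastOpen]
            cases hs : suffixFromLastOpen p <;> simp
          simp only [List.dropLast_cons_of_ne_nil hd, hseg]
      · have hstep : emitted buf inside (c :: cs) =
            emitted (if inside then buf ++ [c] else buf) inside cs := by
          cases inside <;> simp [emitted, h1, h2]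
        rw [hstep, ih]
        unfold emittedSpec
        rw [hsp, hsplit]
        cases ps with
        | nil => simp
        | cons q qs =>
          have hd : (q :: qs) ≠ [] := by simp
          have hseg : segVal (if inside then buf ++ [c] else buf) inside p = segVal buf inside (c :: p) := by
            unfold segVal
            simp only [suffixFromLastOpen]
            cases hs : suffixFromLastOpen p <;> cases inside <;> simp [h1]
          simp only [List.dropLast_cons_of_ne_nil hd, hseg]

theorem emitSeg'_eq (p : List Char) :
    emitSeg' p = (match suffixFromLastOpen p with
                  | some t => String.mk (t ++ ['}'])
                  | none => "}") := by
  unfold emitSeg' segVal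
  cases h : suffixFromLastOpen p <;> simp <;> rfl

-- ===== VERDICT (by name: the statement is the Claim_ definition above) =====
theorem extract_mana_symbols_py_spec : Claim_equal_extract_mana_symbols_py := by
  intro cost_text _
  unfold Spec_extract_mana_symbols_py extract_mana_symbols_py extract_mana_symbols_py_alt
  rw [foldl_eq_emitted, emitted_eq_spec, emittedSpec_base]
  simp only [List.nil_append]
  exact List.map_congr_left (fun p _ => emitSeg'_eq p)
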